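-- pv_equiv track=rewrite | github.com/PrincetonJRose/programming_workspace | Treehouse/teachers_dictionary_challenge.py | most_courses
-- ===== SOURCE A (Python) =====
-- def most_courses(dict):
--     count = []
--     for teacher in dict:
--         count.append(len(dict[teacher]))
--     most = max(count)
--     for teacher in dict:
--         if most == len(dict[teacher]):
--             return teacher
-- ===== SOURCE B (Python) =====
-- def most_courses(dict):
--     ranked = sorted(dict, key=lambda teacher: len(dict[teacher]), reverse=True)
--     return ranked[0]
-- ===== Notes on version B (the rewrite author's own statement) =====
-- stated objective: alternative
-- what changed: B ranks the teachers with a stable descending sort on course count and returns the head of the ranking, instead of A's two passes that build a list of all counts, take its max, and rescan the dict for the first teacher with that count; stability of sorted makes the tie-breaking identical.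
import Mathlib
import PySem

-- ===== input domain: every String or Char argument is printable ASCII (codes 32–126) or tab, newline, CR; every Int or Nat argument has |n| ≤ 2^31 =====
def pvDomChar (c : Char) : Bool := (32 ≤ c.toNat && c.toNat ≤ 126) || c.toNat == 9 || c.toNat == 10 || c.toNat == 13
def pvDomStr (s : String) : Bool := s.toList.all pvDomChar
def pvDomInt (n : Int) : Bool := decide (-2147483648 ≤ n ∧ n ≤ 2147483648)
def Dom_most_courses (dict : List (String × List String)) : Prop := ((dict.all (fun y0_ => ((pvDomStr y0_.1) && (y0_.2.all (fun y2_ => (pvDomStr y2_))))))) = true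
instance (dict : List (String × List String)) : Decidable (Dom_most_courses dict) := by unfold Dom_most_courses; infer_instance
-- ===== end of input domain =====

-- B ranks teachers by a stable descending sort on course count and takes the head, instead of A's count-list + rescan; same result, same tie-breaking.


-- len(dict[teacher]) for a teacher taken from the dict (lookup = first match, as Python's dict)
def courseLen (dict : List (String × List String)) (t : String) : Int :=
  ((PySem.Dict.mk dict).getD t []).length

-- ===== PORT A =====
-- count = [len(dict[t]) for t in dict]; most = max(count); return first t with most == len(dict[t])
def most_courses (dict : List (String × List String)) : String :=
  let count : List Int := dict.map (fun p => courseLen dict p.1)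
  match PySem.List.max? count (fun y => y) with
  | none => ""          -- Python: max([]) raises ValueError; excluded by Pre_
  | some most =>
    match dict.find? (fun p => most == courseLen dict p.1) with
    | some p => p.1
    | none => ""        -- Python would return None here; unreachable (most is attained)

-- ===== PORT B =====
-- ranked = sorted(dict, key=lambda t: len(dict[t]), reverse=True); return ranked[0]
def most_courses_alt (dict : List (String × List String)) : String :=
  let ranked := PySem.List.sorted dict (fun p => courseLen dict p.1) true
  match ranked with
  | p :: _ => p.1
  | [] => ""            -- Python: ranked[0] raises IndexError on the empty dict; excluded by Pre_

-- ===== PRECONDITION & SPEC =====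
-- A raises ValueError (max of an empty sequence) and B raises IndexError on the empty dict; only that input is excluded.
def Pre_most_courses (dict : List (String × List String)) : Prop := dict ≠ []
instance (dict : List (String × List String)) : Decidable (Pre_most_courses dict) := by unfold Pre_most_courses; infer_instance
def pvWitness_most_courses : (List (String × List String)) := [("alice", ["math"])]

def Spec_most_courses (dict : List (String × List String)) (out : String) : Prop := out = most_courses_alt dict
instance (dict : List (String × List String)) (out : String) : Decidable (Spec_most_courses dict out) := by unfold Spec_most_courses; infer_instance

-- ===== CLAIM (what is proved, stated in full; the proofs are below) =====
def Claim_equal_most_courses : Prop := ∀ (dict : List (String × List String)), Dom_most_courses dict → Pre_most_courses dict → Spec_most_courses dict (most_courses dict)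

-- ===== LEMMAS AND PROOFS =====

-- head of the stable reverse insertion-sort fold = the first-maximum argmax fold
theorem head_foldl_insertBy {α : Type} (f : α → Int) :
    ∀ (l : List α) (x : α) (t : List α),
      ∃ t', l.foldl (fun acc y => PySem.List.insertBy (fun a b => decide (f b < f a)) y acc) (x :: t)
        = (l.foldl (fun m y => if f m < f y then y else m) x) :: t' := by
  intro l
  induction l with
  | nil => intro x t; exact ⟨t, rfl⟩
  | cons y l ih =>
    intro x t
    simp only [List.foldl, PySem.List.insertBy]
    by_cases h : f x < f y <;> simp only [h, decide_true, decide_false, if_true, if_false]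
    · exact ih y (x :: t)
    · exact ih x _

-- first element whose key equals the running max  =  the argmax fold
theorem find?_max_eq_argmax {α : Type} (f : α → Int) :
    ∀ (l : List α) (x : α),
      (x :: l).find? (fun p => ((l.map f).foldl max (f x)) == f p)
      = some (l.foldl (fun m y => if f m < f y then y else m) x) := by
  intro l
  induction l with
  | nil => intro x; simp [List.find?]
  | cons y l ih =>
    intro x
    by_cases h : f x < f y
    · -- running max moves to y; x cannot attain the max
      have hmax : max (f x) (f y) = f y := by omega
      have hy := (PySem.List.le_foldl_max (l.map f) (f y)).1
      have hxne : ((l.map f).foldl max (f y) == f x) = false := by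
        simp only [beq_eq_false_iff_ne, ne_eq]
        omega
      have := ih y
      simp only [List.map, List.foldl, hmax, List.foldl_cons, List.find?, hxne] at *
      simp [h, this]
    · -- running max stays with x's side; y cannot strictly beat it
      have hmax : max (f x) (f y) = f x := by omega
      have hx := (PySem.List.le_foldl_max (l.map f) (f x)).1
      have := ih x
      simp only [List.map, List.foldl, hmax, List.foldl_cons] at *
      by_cases hxeq : ((l.map f).foldl max (f x) == f x) = true
      · simp only [List.find?, hxeq] at *
        simp [h, this]
      · have hyne : ((l.map f).foldl max (f x) == f y) = false := by
          simp only [beq_eq_false_iff_ne, ne_eq]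
          simp only [beq_iff_eq] at hxeq
          omega
        simp only [List.find?, Bool.eq_false_iff.mpr hxeq, hyne] at *
        simp [h, this]

-- ===== VERDICT (by name: the statement is the Claim_ definition above) =====
set_option maxHeartbeats 1000000 in
theorem most_courses_spec : Claim_equal_most_courses := by
  intro dict _ hpre
  simp only [Spec_most_courses, most_courses, most_courses_alt]
  match dict, hpre with
  | (t, cs) :: rest, _ =>
    have hmax : PySem.List.max? (((t, cs) :: rest).map (fun p => courseLen ((t, cs) :: rest) p.1)) (fun y => y)
        = some ((rest.map (fun p => courseLen ((t, cs) :: rest) p.1)).foldl max (courseLen ((t, cs) :: rest) t)) := by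
      rw [List.map_cons, PySem.List.max?_id_cons]
    have hfind : List.find?
        (fun p => (List.foldl max (courseLen ((t, cs) :: rest) t)
            (List.map (fun p => courseLen ((t, cs) :: rest) p.1) rest)) == courseLen ((t, cs) :: rest) p.1)
        ((t, cs) :: rest)
        = some (List.foldl (fun m y => if courseLen ((t, cs) :: rest) m.1 < courseLen ((t, cs) :: rest) y.1 then y else m) (t, cs) rest) :=
      find?_max_eq_argmax (fun p => courseLen ((t, cs) :: rest) p.1) rest (t, cs)
    obtain ⟨t', ht'⟩ := head_foldl_insertBy (fun p => courseLen ((t, cs) :: rest) p.1) rest (t, cs) []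
    have hB : PySem.List.sorted ((t, cs) :: rest) (fun p => courseLen ((t, cs) :: rest) p.1) true
        = (List.foldl (fun m y => if courseLen ((t, cs) :: rest) m.1 < courseLen ((t, cs) :: rest) y.1 then y else m) (t, cs) rest) :: t' := by
      rw [PySem.List.sorted_rev_eq_foldl_insertBy, List.foldl_cons]
      exact ht'
    simp only [hmax, hB, hfind]
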